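-- pv_equiv track=rewrite | github.com/ThomasZumsteg/project-euler | problem_0011.py | find_largest_multiple_of_n
-- ===== SOURCE A (Python) =====
-- from operator import mul
--
-- def find_largest_multiple_of_n(data,n):
--     max_multiple = 0
--     for i in range(len(data)):
--         for j in range(len(data[i])):
--             this_multiple = evaluate(data,j,i,n)
--             if this_multiple > max_multiple:
--                 max_multiple = this_multiple
--     return max_multiple
--
-- def evaluate(data,horz,vert,length):
--     horz_mult, diag_mult, vert_mult, udag_mult = 0, 0, 0, 0
--
--     if len(data[vert])-horz >= length:
--         horz_mult = reduce(mul, data[vert][horz:horz+length])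
--     if len(data[vert])-horz >= length and len(data)-vert >= length:
--         diag_mult = reduce(mul, get_diag(data, horz, vert, length))
--         udag_mult = reduce(mul, get_udag(data, horz, vert, length))
--     if len(data)-vert >= length:
--         vert_mult = reduce(mul, get_vert(data, horz, vert, length))
--     return max(diag_mult, vert_mult, horz_mult, udag_mult)
--
-- def reduce(operator, data):
--     result = data[0]
--     for d in data[1:]:
--         result = operator(result, d)
--     return result
--
-- def get_vert(data, horz, vert, length):
--     vert_list = []
--     for i in range(length):
--         vert_list.append(data[vert+i][horz])
--     return vert_list
--
-- def get_diag(data, horz, vert, length):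
--     diag_list = []
--     for i in range(length):
--         diag_list.append(data[vert + i][horz + i])
--     return diag_list
--
-- def get_udag(data, horz, vert, length):
--     udag_list = []
--     for i in range(length):
--         udag_list.append(data[vert + length - 1 - i][horz + i ])
--     return udag_list
-- ===== SOURCE B (Python) =====
-- def _col_line(data, j):
--     return [r[j] for r in data if j < len(r)]
--
-- def _diag_line(data, s):
--     m = len(data)
--     return [data[i][i + s - (m - 1)] for i in range(m) if 0 <= i + s - (m - 1) < len(data[i])]
--
-- def _udag_line(data, s):
--     return [data[i][s - i] for i in range(len(data)) if 0 <= s - i < len(data[i])]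
--
-- def _lines(data):
--     m = len(data)
--     c = 0
--     for r in data:
--         if len(r) > c:
--             c = len(r)
--     lines = [list(r) for r in data]
--     for j in range(c):
--         lines.append(_col_line(data, j))
--     for s in range(m + c - 1):
--         lines.append(_diag_line(data, s))
--         lines.append(_udag_line(data, s))
--     return lines
--
-- def find_largest_multiple_of_n(data, n):
--     best = 0
--     for line in _lines(data):
--         for s in range(len(line) - n + 1):
--             p = 1
--             for x in line[s : s + n]:
--                 p *= x
--             if p > best:
--                 best = p
--     return best
-- ===== Notes on version B (the rewrite author's own statement) =====
-- stated objective: alternative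
-- what changed: A probes four guarded direction-products from every cell via evaluate(); B first extracts every row, column, diagonal and anti-diagonal as a line and slides a length-n product window over each line, taking the running maximum (initialised to 0).
-- outside the precondition, e.g. on find_largest_multiple_of_n([[1, 9], [1, 1, 9]], 2): A returns 9, B returns 81; on find_largest_multiple_of_n([[]], 0): A returns 0, B returns 1
import Mathlib
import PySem

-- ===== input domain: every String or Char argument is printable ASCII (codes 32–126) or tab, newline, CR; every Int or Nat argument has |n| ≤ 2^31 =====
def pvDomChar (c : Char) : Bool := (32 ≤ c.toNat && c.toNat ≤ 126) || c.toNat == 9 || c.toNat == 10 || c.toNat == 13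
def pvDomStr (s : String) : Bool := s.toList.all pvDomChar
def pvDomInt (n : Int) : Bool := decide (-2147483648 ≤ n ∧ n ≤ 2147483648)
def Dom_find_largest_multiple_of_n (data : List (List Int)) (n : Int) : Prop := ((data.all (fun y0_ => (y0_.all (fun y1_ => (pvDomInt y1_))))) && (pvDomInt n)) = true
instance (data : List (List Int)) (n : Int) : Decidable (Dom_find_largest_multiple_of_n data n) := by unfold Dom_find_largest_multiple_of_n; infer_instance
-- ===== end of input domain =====

-- B replaces A's per-cell four-direction probing by extracting every row, column,
-- diagonal and anti-diagonal as a line and sliding a length-n product window over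
-- each line (objective: alternative decomposition, similar cost).


-- shared helper: data[i][j] (indices are in range wherever the ports use it under Pre_)
def pvCell (data : List (List Int)) (i j : Int) : Int :=
  PySem.List.pyGetD (PySem.List.pyGetD data i []) j 0

-- ===== PORT A =====
-- reduce(mul, l); Python raises IndexError on l = [] — unreachable under Pre_
def pvReduceMul (l : List Int) : Int :=
  match l with
  | [] => 0
  | x :: xs => xs.foldl (· * ·) x

def pvGetVert (data : List (List Int)) (horz vert length : Int) : List Int :=
  (PySem.List.pyRange 0 length 1).map (fun i => pvCell data (vert + i) horz)

def pvGetDiag (data : List (List Int)) (horz vert length : Int) : List Int :=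
  (PySem.List.pyRange 0 length 1).map (fun i => pvCell data (vert + i) (horz + i))

def pvGetUdag (data : List (List Int)) (horz vert length : Int) : List Int :=
  (PySem.List.pyRange 0 length 1).map (fun i => pvCell data (vert + length - 1 - i) (horz + i))

def pvEvaluate (data : List (List Int)) (horz vert length : Int) : Int :=
  let row := PySem.List.pyGetD data vert []
  let horz_mult : Int :=
    if (row.length : Int) - horz ≥ length then
      pvReduceMul (PySem.List.slice row (some horz) (some (horz + length))) else 0
  let diag_mult : Int :=
    if (row.length : Int) - horz ≥ length ∧ (data.length : Int) - vert ≥ length then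
      pvReduceMul (pvGetDiag data horz vert length) else 0
  let udag_mult : Int :=
    if (row.length : Int) - horz ≥ length ∧ (data.length : Int) - vert ≥ length then
      pvReduceMul (pvGetUdag data horz vert length) else 0
  let vert_mult : Int :=
    if (data.length : Int) - vert ≥ length then
      pvReduceMul (pvGetVert data horz vert length) else 0
  max (max (max diag_mult vert_mult) horz_mult) udag_mult

def find_largest_multiple_of_n (data : List (List Int)) (n : Int) : Int :=
  (List.range data.length).foldl (fun acc (i : Nat) =>
    (List.range (data.getD i []).length).foldl (fun acc2 (j : Nat) =>
      let t := pvEvaluate data (j : Int) (i : Int) n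
      if t > acc2 then t else acc2) acc) 0

-- ===== PORT B =====
def pvColLine (data : List (List Int)) (j : Nat) : List Int :=
  data.filterMap (fun r => r[j]?)

def pvDiagLine (data : List (List Int)) (s : Nat) : List Int :=
  (List.range data.length).filterMap (fun (i : Nat) =>
    let jd : Int := (i : Int) + (s : Int) - ((data.length : Int) - 1)
    if 0 ≤ jd ∧ jd < ((data.getD i []).length : Int) then some (pvCell data (i : Int) jd) else none)

def pvUdagLine (data : List (List Int)) (s : Nat) : List Int :=
  (List.range data.length).filterMap (fun (i : Nat) =>
    let ju : Int := (s : Int) - (i : Int)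
    if 0 ≤ ju ∧ ju < ((data.getD i []).length : Int) then some (pvCell data (i : Int) ju) else none)

def pvMaxRowLen (data : List (List Int)) : Nat :=
  data.foldl (fun c r => if r.length > c then r.length else c) 0

def pvLines (data : List (List Int)) : List (List Int) :=
  data ++ (List.range (pvMaxRowLen data)).map (pvColLine data)
       ++ (List.range (data.length + pvMaxRowLen data - 1)).flatMap
            (fun s => [pvDiagLine data s, pvUdagLine data s])

def pvWinProd (line : List Int) (s n : Int) : Int :=
  (PySem.List.slice line (some s) (some (s + n))).foldl (· * ·) 1

def find_largest_multiple_of_n_alt (data : List (List Int)) (n : Int) : Int :=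
  (pvLines data).foldl (fun best line =>
    (PySem.List.pyRange 0 ((line.length : Int) - n + 1) 1).foldl (fun b s =>
      let p := pvWinProd line s n
      if p > b then p else b) best) 0

-- ===== PRECONDITION & SPEC =====
-- Pre_ excludes n ≤ 0, where A's reduce raises IndexError on every grid with a nonempty
-- row, and non-rectangular grids (except the always-safe cases n = 1 and n larger than
-- every grid dimension), where A's under-guarded vertical/diagonal indexing raises
-- IndexError on most inputs and on the rest the set of windows A probes is an accident
-- of the row-length pattern.
def Pre_find_largest_multiple_of_n (data : List (List Int)) (n : Int) : Prop :=
  1 ≤ n ∧ ((∀ r ∈ data, r.length = (data.headD []).length) ∨ n = 1 ∨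
    ((data.length : Int) < n ∧ ∀ r ∈ data, (r.length : Int) < n))
instance (data : List (List Int)) (n : Int) : Decidable (Pre_find_largest_multiple_of_n data n) := by
  unfold Pre_find_largest_multiple_of_n; infer_instance

def pvWitness_find_largest_multiple_of_n : List (List Int) × Int := ([[1, 2], [3, 4]], 2)

def Spec_find_largest_multiple_of_n (data : List (List Int)) (n : Int) (out : Int) : Prop := out = find_largest_multiple_of_n_alt data n
instance (data : List (List Int)) (n : Int) (out : Int) : Decidable (Spec_find_largest_multiple_of_n data n out) := by unfold Spec_find_largest_multiple_of_n; infer_instance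

-- ===== CLAIM (what is proved, stated in full; the proofs are below) =====
def Claim_equal_find_largest_multiple_of_n : Prop := ∀ (data : List (List Int)) (n : Int), Dom_find_largest_multiple_of_n data n → Pre_find_largest_multiple_of_n data n → Spec_find_largest_multiple_of_n data n (find_largest_multiple_of_n data n)

-- ===== LEMMAS AND PROOFS =====

-- canonical cell access and window products
def pvG (data : List (List Int)) (i j : Nat) : Int := (data.getD i []).getD j 0

def pvProdK (N : Nat) (f : Nat → Int) : Int := ((List.range N).map f).prod

lemma pvProdK_congr (N : Nat) (f g : Nat → Int) (h : ∀ k < N, f k = g k) :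
    pvProdK N f = pvProdK N g := by
  unfold pvProdK
  rw [List.map_congr_left (fun k hk => h k (List.mem_range.mp hk))]

lemma pvProdK_eq_finset (N : Nat) (f : Nat → Int) :
    pvProdK N f = ∏ i ∈ Finset.range N, f i := rfl

lemma pvProdK_reflect (N : Nat) (f : Nat → Int) :
    pvProdK N (fun k => f (N - 1 - k)) = pvProdK N f := by
  rw [pvProdK_eq_finset, pvProdK_eq_finset]
  exact Finset.prod_range_reflect f N

-- fold-max plumbing
lemma foldl_if_max_map {α : Type} (l : List α) (f : α → Int) (a : Int) :
    l.foldl (fun b x => if f x > b then f x else b) a = (l.map f).foldl max a := by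
  induction l generalizing a with
  | nil => rfl
  | cons x xs ih =>
      simp only [List.foldl_cons, List.map_cons, ih]
      congr 1
      by_cases h : f x > a
      · rw [if_pos h, max_eq_right h.le]
      · rw [if_neg h, max_eq_left (by omega)]

lemma foldl_nested_if {α β : Type} (L : List α) (g : α → List β) (f : α → β → Int) (a : Int) :
    L.foldl (fun acc x => (g x).foldl (fun b y => if f x y > b then f x y else b) acc) a
      = (L.flatMap (fun x => (g x).map (f x))).foldl max a := by
  induction L generalizing a with
  | nil => rfl
  | cons x xs ih =>
      simp only [List.foldl_cons]
      rw [foldl_if_max_map, ih, List.flatMap_cons, List.foldl_append]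

lemma foldl_max_le {l : List Int} {a b : Int} (ha : a ≤ b) (h : ∀ x ∈ l, x ≤ b) :
    l.foldl max a ≤ b := by
  induction l generalizing a with
  | nil => exact ha
  | cons x xs ih =>
      exact ih (max_le ha (h x (by simp))) (fun y hy => h y (by simp [hy]))

-- A as a fold of max over the flat list of per-cell evaluations
def pvCA (data : List (List Int)) (n : Int) : List Int :=
  (List.range data.length).flatMap (fun (i : Nat) =>
    (List.range (data.getD i []).length).map (fun (j : Nat) => pvEvaluate data (j : Int) (i : Int) n))

lemma A_eq (data : List (List Int)) (n : Int) :
    find_largest_multiple_of_n data n = (pvCA data n).foldl max 0 := by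
  unfold find_largest_multiple_of_n pvCA
  exact foldl_nested_if (List.range data.length)
    (fun i => List.range (data.getD i []).length)
    (fun i j => pvEvaluate data (j : Int) (i : Int) n) 0

-- B as a fold of max over the flat list of window products
def pvCB (data : List (List Int)) (n : Int) : List Int :=
  (pvLines data).flatMap (fun line =>
    (PySem.List.pyRange 0 ((line.length : Int) - n + 1) 1).map (fun s => pvWinProd line s n))

lemma B_eq (data : List (List Int)) (n : Int) :
    find_largest_multiple_of_n_alt data n = (pvCB data n).foldl max 0 := by
  unfold find_largest_multiple_of_n_alt pvCB
  exact foldl_nested_if (pvLines data)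
    (fun line => PySem.List.pyRange 0 ((line.length : Int) - n + 1) 1)
    (fun line s => pvWinProd line s n) 0

-- window slices of map-range lines
lemma take_drop_eq_map_range (l : List Int) (s N : Nat) (h : s + N ≤ l.length) :
    (l.drop s).take N = (List.range N).map (fun k => l.getD (s + k) 0) := by
  apply List.ext_getElem
  · simp; omega
  · intro k hk1 hk2
    simp only [List.getElem_take, List.getElem_drop, List.getElem_map, List.getElem_range]
    rw [List.getD_eq_getElem l 0 (by simp at hk1 ⊢; omega)]

lemma winProd_map_range (L N s : Nat) (f : Nat → Int) (h : s + N ≤ L) :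
    pvWinProd ((List.range L).map f) (s : Int) (N : Int) = pvProdK N (fun k => f (s + k)) := by
  unfold pvWinProd
  rw [PySem.List.slice_natCast_add, ← List.prod_eq_foldl,
    take_drop_eq_map_range _ s N (by simpa using h)]
  exact pvProdK_congr N _ _ (fun k hk => PySem.List.getD_map_range f L (s + k) 0 (by omega))

lemma reduce_eq_prod (l : List Int) (h : l ≠ []) : pvReduceMul l = l.prod := by
  cases l with
  | nil => exact absurd rfl h
  | cons x xs => simp [pvReduceMul, List.prod_eq_foldl, List.foldl_cons]

lemma reduceMul_map_range (N : Nat) (hN : 1 ≤ N) (f : Nat → Int) :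
    pvReduceMul ((List.range N).map f) = pvProdK N f := by
  rw [reduce_eq_prod _ (by simp; omega)]; rfl

-- membership in the B candidate list
lemma mem_CB_of (data : List (List Int)) (n : Int) (line : List Int) (s N : Nat)
    (hline : line ∈ pvLines data) (hn : n = (N : Int)) (hs : s + N ≤ line.length) (hN : 1 ≤ N) :
    pvWinProd line (s : Int) n ∈ pvCB data n := by
  unfold pvCB
  refine List.mem_flatMap.mpr ⟨line, hline, List.mem_map.mpr ⟨(s : Int), ?_, rfl⟩⟩
  rw [PySem.List.mem_pyRange_one]
  subst hn; push_cast; omega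

-- membership in the A candidate list
lemma mem_CA_of (data : List (List Int)) (n : Int) (i j : Nat)
    (hi : i < data.length) (hj : j < (data.getD i []).length) :
    pvEvaluate data (j : Int) (i : Int) n ∈ pvCA data n := by
  unfold pvCA
  exact List.mem_flatMap.mpr ⟨i, List.mem_range.mpr hi,
    List.mem_map.mpr ⟨j, List.mem_range.mpr hj, rfl⟩⟩

-- the rectangular context
lemma row_eq (data : List (List Int)) (c : Nat)
    (hrect : ∀ r ∈ data, r.length = c) (i : Nat) (hi : i < data.length) :
    (data.getD i []).length = c := by
  rw [List.getD_eq_getElem data [] hi]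
  exact hrect _ (List.getElem_mem hi)

lemma row_eq_map_range (data : List (List Int)) (c : Nat)
    (hrect : ∀ r ∈ data, r.length = c) (i : Nat) (hi : i < data.length) :
    data.getD i [] = (List.range c).map (fun j => pvG data i j) := by
  apply List.ext_getElem
  · simpa using row_eq data c hrect i hi
  · intro k hk1 hk2
    simp only [List.getElem_map, List.getElem_range, pvG]
    rw [List.getD_eq_getElem _ 0 hk1]

lemma foldl_maxlen (c : Nat) (l : List (List Int)) :
    ∀ acc : Nat, (∀ r ∈ l, r.length = c) →
    l.foldl (fun a r => if r.length > a then r.length else a) acc =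
      if l = [] then acc else max acc c := by
  induction l with
  | nil => intro acc _; rfl
  | cons r rs ih =>
      intro acc h
      have hr : r.length = c := h r (by simp)
      simp only [List.foldl_cons]
      rw [ih _ (fun x hx => h x (by simp [hx]))]
      rw [hr]
      simp only [Nat.max_def, List.cons_ne_nil, if_false]
      split_ifs <;> first | omega | simp_all

lemma pvMaxRowLen_eq (data : List (List Int)) (c : Nat)
    (hrect : ∀ r ∈ data, r.length = c) (hne : data ≠ []) :
    pvMaxRowLen data = c := by
  unfold pvMaxRowLen
  rw [foldl_maxlen c data 0 hrect, if_neg hne]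
  omega

lemma pvCell_natCast (data : List (List Int)) (i j : Nat) :
    pvCell data (i : Int) (j : Int) = pvG data i j := by
  simp [pvCell, pvG, PySem.List.pyGetD_natCast]

-- evaluate in normal form
lemma evaluate_eq (data : List (List Int)) (c N i j : Nat)
    (hrect : ∀ r ∈ data, r.length = c) (hN : 1 ≤ N)
    (hi : i < data.length) (hj : j < c) :
    pvEvaluate data (j : Int) (i : Int) (N : Int) =
      max (max (max
        (if j + N ≤ c ∧ i + N ≤ data.length then pvProdK N (fun k => pvG data (i + k) (j + k)) else 0)
        (if i + N ≤ data.length then pvProdK N (fun k => pvG data (i + k) j) else 0))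
        (if j + N ≤ c then pvProdK N (fun k => pvG data i (j + k)) else 0))
        (if j + N ≤ c ∧ i + N ≤ data.length then pvProdK N (fun k => pvG data (i + N - 1 - k) (j + k)) else 0) := by
  have hrow : PySem.List.pyGetD data ((i : Nat) : Int) [] = data.getD i [] := by simp
  have hlen := row_eq data c hrect i hi
  have hvert : pvGetVert data (j : Int) (i : Int) (N : Int) =
      (List.range N).map (fun k => pvG data (i + k) j) := by
    unfold pvGetVert
    rw [PySem.List.pyRange_zero_natCast, List.map_map]
    refine List.map_congr_left (fun k hk => ?_)
    simp only [Function.comp_apply]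
    rw [show (i : Int) + (k : Int) = ((i + k : Nat) : Int) by push_cast; ring, pvCell_natCast]
  have hdiag : pvGetDiag data (j : Int) (i : Int) (N : Int) =
      (List.range N).map (fun k => pvG data (i + k) (j + k)) := by
    unfold pvGetDiag
    rw [PySem.List.pyRange_zero_natCast, List.map_map]
    refine List.map_congr_left (fun k hk => ?_)
    simp only [Function.comp_apply]
    rw [show (i : Int) + (k : Int) = ((i + k : Nat) : Int) by push_cast; ring,
      show (j : Int) + (k : Int) = ((j + k : Nat) : Int) by push_cast; ring, pvCell_natCast]
  have hudag : pvGetUdag data (j : Int) (i : Int) (N : Int) =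
      (List.range N).map (fun k => pvG data (i + N - 1 - k) (j + k)) := by
    unfold pvGetUdag
    rw [PySem.List.pyRange_zero_natCast, List.map_map]
    refine List.map_congr_left (fun k hk => ?_)
    have hk' := List.mem_range.mp hk
    simp only [Function.comp_apply]
    rw [show (i : Int) + (N : Int) - 1 - (k : Int) = ((i + N - 1 - k : Nat) : Int) by omega,
      show (j : Int) + (k : Int) = ((j + k : Nat) : Int) by push_cast; ring, pvCell_natCast]
  have hhorz : j + N ≤ c → pvReduceMul (PySem.List.slice (data.getD i [])
      (some (j : Int)) (some ((j : Int) + (N : Int)))) = pvProdK N (fun k => pvG data i (j + k)) := by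
    intro hg
    rw [PySem.List.slice_natCast_add]
    rw [reduce_eq_prod _ (by
      intro hnil
      have hl2 := congrArg List.length hnil
      rw [List.length_take, List.length_drop, hlen, List.length_nil] at hl2
      omega)]
    rw [take_drop_eq_map_range _ j N (by omega)]
    rfl
  unfold pvEvaluate
  simp only [hrow, hlen]
  split_ifs with h1 h2 h3 h4 h5 h6 h7 h8 h9 h10 h11 h12 <;>
    first
      | omega
      | (first | exfalso; omega
               | (simp only [hvert, hdiag, hudag, reduceMul_map_range N hN,
                    hhorz (by omega)]))
      | (simp only [hvert, hdiag, hudag, reduceMul_map_range N hN])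

-- interval filterMap over a range
lemma filterMap_none_of {β γ : Type} (l : List γ) (F : γ → Option β)
    (h : ∀ i ∈ l, F i = none) : l.filterMap F = [] := by
  rw [List.filterMap_congr h]
  simp

lemma filterMap_range_interval {β : Type} (m lo hi : Nat) (F : Nat → Option β) (f : Nat → β)
    (hhi : hi ≤ m)
    (h : ∀ i, i < m → F i = if lo ≤ i ∧ i < hi then some (f i) else none) :
    (List.range m).filterMap F = (List.range (hi - lo)).map (fun t => f (lo + t)) := by
  by_cases hle : hi ≤ lo
  · rw [Nat.sub_eq_zero_of_le hle]
    simp only [List.range_zero, List.map_nil]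
    exact filterMap_none_of _ _ (fun i hi' => by
      rw [h i (List.mem_range.mp hi'), if_neg (by omega)])
  · push_neg at hle
    have hm : m = lo + ((hi - lo) + (m - hi)) := by omega
    rw [List.range_eq_range', hm,
      ← List.range'_append (s := 0) (m := lo) (n := (hi - lo) + (m - hi)) (step := 1),
      ← List.range'_append (s := 0 + 1 * lo) (m := hi - lo) (n := m - hi) (step := 1)]
    rw [List.filterMap_append, List.filterMap_append]
    have hz : (0 : Nat) + 1 * lo = lo := by omega
    rw [hz]
    have h1 : (List.range' 0 lo 1).filterMap F = [] := by
      refine filterMap_none_of _ _ (fun i hi' => ?_)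
      have := List.mem_range'_1.mp hi'
      rw [h i (by omega), if_neg (by omega)]
    have h3 : (List.range' (lo + 1 * (hi - lo)) (m - hi) 1).filterMap F = [] := by
      refine filterMap_none_of _ _ (fun i hi' => ?_)
      have := List.mem_range'_1.mp hi'
      rw [h i (by omega), if_neg (by omega)]
    rw [h1, h3, List.nil_append, List.append_nil]
    have h2 : (List.range' lo (hi - lo) 1).filterMap F =
        (List.range' lo (hi - lo) 1).map f := by
      rw [List.filterMap_congr (g := fun i => (some ∘ f) i) (fun i hi' => by
        have := List.mem_range'_1.mp hi'
        rw [h i (by omega), if_pos (by omega)]; rfl)]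
      exact congrFun (List.filterMap_eq_map) _
    rw [h2, List.range'_eq_map_range, List.map_map]
    exact List.map_congr_left (fun t _ => rfl)

-- line characterizations
lemma pvColLine_eq (data : List (List Int)) (c : Nat)
    (hrect : ∀ r ∈ data, r.length = c) (j : Nat) (hj : j < c) :
    pvColLine data j = (List.range data.length).map (fun i => pvG data i j) := by
  unfold pvColLine
  rw [List.filterMap_congr (g := fun r => (some ∘ fun r => r.getD j 0) r) (fun r hr => by
    have hl : j < r.length := by rw [hrect r hr]; exact hj
    simp only [Function.comp_apply]
    rw [List.getD_eq_getElem r 0 hl]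
    exact List.getElem?_eq_getElem hl)]
  rw [congrFun (List.filterMap_eq_map) _]
  apply List.ext_getElem
  · simp
  · intro k hk1 hk2
    simp only [List.getElem_map, List.getElem_range, pvG]
    rw [List.getD_eq_getElem data [] (by simpa using hk2)]

lemma pvDiagLine_eq (data : List (List Int)) (c : Nat)
    (hrect : ∀ r ∈ data, r.length = c) (s : Nat) :
    pvDiagLine data s =
      (List.range (min data.length (data.length + c - s - 1) - (data.length - s - 1))).map
        (fun t => pvG data (data.length - s - 1 + t) (data.length - s - 1 + t + s + 1 - data.length)) := by
  unfold pvDiagLine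
  refine filterMap_range_interval data.length (data.length - s - 1)
    (min data.length (data.length + c - s - 1)) _
    (fun i => pvG data i (i + s + 1 - data.length)) (by omega) (fun i hi => ?_)
  simp only
  have hc : (data.getD i []).length = c := row_eq data c hrect i hi
  by_cases hcond : data.length - s - 1 ≤ i ∧ i < min data.length (data.length + c - s - 1)
  · rw [if_pos (by rw [hc]; push_cast; omega), if_pos hcond]
    have hjd : (i : Int) + (s : Int) - ((data.length : Int) - 1) = ((i + s + 1 - data.length : Nat) : Int) := by
      push_cast [Nat.cast_sub (by omega : data.length ≤ i + s + 1)]; ring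
    rw [hjd, pvCell_natCast]
  · rw [if_neg (by rw [hc]; push_cast; omega), if_neg hcond]

lemma pvUdagLine_eq (data : List (List Int)) (c : Nat)
    (hrect : ∀ r ∈ data, r.length = c) (s : Nat) :
    pvUdagLine data s =
      (List.range (min data.length (s + 1) - (s + 1 - c))).map
        (fun t => pvG data (s + 1 - c + t) (s - (s + 1 - c + t))) := by
  unfold pvUdagLine
  refine filterMap_range_interval data.length (s + 1 - c) (min data.length (s + 1)) _
    (fun i => pvG data i (s - i)) (by omega) (fun i hi => ?_)
  simp only
  have hc : (data.getD i []).length = c := row_eq data c hrect i hi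
  by_cases hcond : s + 1 - c ≤ i ∧ i < min data.length (s + 1)
  · rw [if_pos (by rw [hc]; push_cast; omega), if_pos hcond]
    have hju : (s : Int) - (i : Int) = ((s - i : Nat) : Int) := by
      push_cast [Nat.cast_sub (by omega : i ≤ s)]; ring
    rw [hju, pvCell_natCast]
  · rw [if_neg (by rw [hc]; push_cast; omega), if_neg hcond]

-- the always-safe non-rectangular cases: n = 1 and n larger than every dimension
lemma evaluate_zero_of_big (data : List (List Int)) (N i j : Nat)
    (hm : data.length < N) (hr : (data.getD i []).length < N) :
    pvEvaluate data (j : Int) (i : Int) (N : Int) = 0 := by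
  have hrow : PySem.List.pyGetD data ((i : Nat) : Int) [] = data.getD i [] := by simp
  unfold pvEvaluate
  simp only [hrow]
  have hA : ¬ (((data.getD i []).length : Int) - (j : Int) ≥ ((N : Nat) : Int)) := by
    push_cast; omega
  have hB : ¬ (((data.length : Nat) : Int) - (i : Int) ≥ ((N : Nat) : Int)) := by
    push_cast; omega
  have hAB : ¬ ((((data.getD i []).length : Int) - (j : Int) ≥ ((N : Nat) : Int)) ∧
      (((data.length : Nat) : Int) - (i : Int) ≥ ((N : Nat) : Int))) := fun h => hA h.1
  rw [if_neg hA, if_neg hAB, if_neg hAB, if_neg hB]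
  simp

lemma lines_len_lt (data : List (List Int)) (N : Nat)
    (hm : data.length < N) (hrows : ∀ r ∈ data, r.length < N) :
    ∀ line ∈ pvLines data, line.length < N := by
  intro line hl
  unfold pvLines at hl
  rcases List.mem_append.mp hl with h12 | hdg
  · rcases List.mem_append.mp h12 with hrow | hcol
    · exact hrows line hrow
    · obtain ⟨j, _, rfl⟩ := List.mem_map.mp hcol
      exact lt_of_le_of_lt (List.length_filterMap_le _ _) hm
  · obtain ⟨s0, _, hin⟩ := List.mem_flatMap.mp hdg
    simp only [List.mem_cons, List.not_mem_nil, or_false] at hin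
    rcases hin with rfl | rfl <;>
      exact lt_of_le_of_lt (le_trans (List.length_filterMap_le _ _) (by simp)) hm

lemma evaluate_one (data : List (List Int)) (i j : Nat)
    (hi : i < data.length) (hj : j < (data.getD i []).length) :
    pvEvaluate data (j : Int) (i : Int) (((1:Nat)) : Int) = pvG data i j := by
  have hrow : PySem.List.pyGetD data ((i : Nat) : Int) [] = data.getD i [] := by simp
  have hone : pvReduceMul (PySem.List.slice (data.getD i [])
      (some (j : Int)) (some ((j : Int) + ((1:Nat) : Int)))) = pvG data i j := by
    rw [PySem.List.slice_natCast_add, take_drop_eq_map_range _ j 1 (by omega)]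
    simp [pvReduceMul, pvG]
  have hmaps : ∀ f : Int → Int, (PySem.List.pyRange 0 ((1:Nat) : Int) 1).map f = [f 0] := by
    intro f
    rw [PySem.List.pyRange_zero_natCast]
    simp
  unfold pvEvaluate
  simp only [hrow]
  have hA : ((data.getD i []).length : Int) - (j : Int) ≥ (((1:Nat)) : Int) := by push_cast; omega
  have hB : ((data.length : Nat) : Int) - (i : Int) ≥ (((1:Nat)) : Int) := by push_cast; omega
  rw [if_pos hA, if_pos (And.intro hA hB), if_pos (And.intro hA hB), if_pos hB]
  unfold pvGetDiag pvGetUdag pvGetVert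
  rw [hmaps, hmaps, hmaps, hone]
  have hcell : ∀ a b : Int, a = (i : Int) → b = (j : Int) → pvCell data a b = pvG data i j := by
    intro a b ha hb; rw [ha, hb, pvCell_natCast]
  rw [show pvCell data ((i:Int) + 0) ((j:Int) + 0) = pvG data i j from hcell _ _ (by ring) (by ring),
    show pvCell data ((i:Int) + ((1:Nat):Int) - 1 - 0) ((j:Int) + 0) = pvG data i j from
      hcell _ _ (by push_cast; ring) (by ring),
    show pvCell data ((i:Int) + 0) ((j:Int)) = pvG data i j from hcell _ _ (by ring) rfl]
  simp [pvReduceMul]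

lemma winProd_one (line : List Int) (s : Nat) (h : s < line.length) :
    pvWinProd line (s : Int) (((1:Nat)) : Int) = line.getD s 0 := by
  unfold pvWinProd
  rw [PySem.List.slice_natCast_add, take_drop_eq_map_range _ s 1 (by omega)]
  simp

lemma mem_line_is_cell (data : List (List Int)) :
    ∀ line ∈ pvLines data, ∀ s : Nat, s < line.length →
    ∃ i j : Nat, i < data.length ∧ j < (data.getD i []).length ∧ line.getD s 0 = pvG data i j := by
  intro line hl s hs
  unfold pvLines at hl
  rcases List.mem_append.mp hl with h12 | hdg
  · rcases List.mem_append.mp h12 with hrow | hcol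
    · obtain ⟨i, hi, hieq⟩ := List.getElem_of_mem hrow
      refine ⟨i, s, hi, ?_, ?_⟩
      · rw [List.getD_eq_getElem data [] hi, hieq]; exact hs
      · unfold pvG; rw [List.getD_eq_getElem data [] hi, hieq]
    · obtain ⟨j, hjm, rfl⟩ := List.mem_map.mp hcol
      have hmem : (pvColLine data j).getD s 0 ∈ pvColLine data j := by
        rw [List.getD_eq_getElem _ 0 hs]; exact List.getElem_mem hs
      obtain ⟨r, hr, hsome⟩ := List.mem_filterMap.mp hmem
      obtain ⟨i, hi, hieq⟩ := List.getElem_of_mem hr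
      have hjlen : j < r.length := by
        by_contra hno
        rw [List.getElem?_eq_none (by omega)] at hsome
        simp at hsome
      rw [List.getElem?_eq_getElem hjlen] at hsome
      injection hsome with hx
      refine ⟨i, j, hi, by rw [List.getD_eq_getElem data [] hi, hieq]; exact hjlen, ?_⟩
      rw [← hx]
      unfold pvG
      rw [List.getD_eq_getElem data [] hi, hieq, List.getD_eq_getElem r 0 hjlen]
  · obtain ⟨s0, _, hin⟩ := List.mem_flatMap.mp hdg
    simp only [List.mem_cons, List.not_mem_nil, or_false] at hin
    have hgen : ∀ (J : Nat → Int),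
        ∀ x ∈ (List.range data.length).filterMap
          (fun (i0 : Nat) => if 0 ≤ J i0 ∧ J i0 < ((data.getD i0 []).length : Int)
            then some (pvCell data (i0 : Int) (J i0)) else none),
        ∃ i j : Nat, i < data.length ∧ j < (data.getD i []).length ∧ x = pvG data i j := by
      intro J x hx
      obtain ⟨i0, hi0, hsome⟩ := List.mem_filterMap.mp hx
      have hi0' := List.mem_range.mp hi0
      by_cases hcond : 0 ≤ J i0 ∧ J i0 < ((data.getD i0 []).length : Int)
      · rw [if_pos hcond] at hsome
        injection hsome with hx'
        refine ⟨i0, (J i0).toNat, hi0', by omega, ?_⟩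
        rw [← hx', show J i0 = (((J i0).toNat : Nat) : Int) by omega, pvCell_natCast]
        congr 1 <;> omega
      · rw [if_neg hcond] at hsome
        simp at hsome
    have hmem : line.getD s 0 ∈ line := by
      rw [List.getD_eq_getElem _ 0 hs]; exact List.getElem_mem hs
    rcases hin with rfl | rfl
    · exact hgen (fun i0 => (i0 : Int) + (s0 : Int) - ((data.length : Int) - 1)) _ hmem
    · exact hgen (fun i0 => (s0 : Int) - (i0 : Int)) _ hmem

-- ===== VERDICT (by name: the statement is the Claim_ definition above) =====
theorem find_largest_multiple_of_n_spec : Claim_equal_find_largest_multiple_of_n := by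
  intro data n _ hpre
  obtain ⟨hn1, hdisj⟩ := hpre
  unfold Spec_find_largest_multiple_of_n
  rcases eq_or_ne data [] with rfl | hne
  · rfl
  obtain ⟨N, rfl⟩ : ∃ N : Nat, n = (N : Int) := ⟨n.toNat, (Int.toNat_of_nonneg (by omega)).symm⟩
  have hN : 1 ≤ N := by exact_mod_cast hn1
  have hA0 : (0:Int) ≤ (pvCA data (N:Int)).foldl max 0 := (PySem.List.le_foldl_max _ 0).1
  have hB0 : (0:Int) ≤ (pvCB data (N:Int)).foldl max 0 := (PySem.List.le_foldl_max _ 0).1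
  have hEvalLe : ∀ i j : Nat, i < data.length → j < (data.getD i []).length →
      pvEvaluate data (j:Int) (i:Int) (N:Int) ≤ (pvCA data (N:Int)).foldl max 0 := by
    intro i j hi hj
    exact (PySem.List.le_foldl_max _ 0).2 _ (mem_CA_of data (N:Int) i j hi hj)
  have hWinLe : ∀ (line : List Int) (s : Nat), line ∈ pvLines data → s + N ≤ line.length →
      pvWinProd line (s:Int) (N:Int) ≤ (pvCB data (N:Int)).foldl max 0 := by
    intro line s hl hs
    exact (PySem.List.le_foldl_max _ 0).2 _ (mem_CB_of data (N:Int) line s N hl rfl hs hN)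
  rw [A_eq, B_eq]
  rcases hdisj with hrect | hone | hbig
  -- ============ rectangular grid ============
  case _ =>
   set c := (data.headD []).length with hc
   have hmax : pvMaxRowLen data = c := pvMaxRowLen_eq data c hrect hne
   apply le_antisymm
   · -- A ≤ B
    apply foldl_max_le hB0
    intro x hx
    obtain ⟨i, hi, hx⟩ := List.mem_flatMap.mp hx
    obtain ⟨j, hj, rfl⟩ := List.mem_map.mp hx
    have hi' := List.mem_range.mp hi
    have hj' : j < c := by rw [← row_eq data c hrect i hi']; exact List.mem_range.mp hj
    rw [evaluate_eq data c N i j hrect hN hi' hj']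
    refine max_le (max_le (max_le ?hd ?hv) ?hh) ?hu
    case hh =>
      split_ifs with hg
      · have hrowline : data.getD i [] ∈ pvLines data := by
          unfold pvLines
          exact List.mem_append_left _ (List.mem_append_left _
            (by rw [List.getD_eq_getElem data [] hi']; exact List.getElem_mem hi'))
        have hw := hWinLe (data.getD i []) j hrowline (by rw [row_eq data c hrect i hi']; omega)
        rwa [row_eq_map_range data c hrect i hi', winProd_map_range c N j _ (by omega)] at hw
      · exact hB0
    case hv =>
      split_ifs with hg
      · have hcolmem : pvColLine data j ∈ pvLines data := by
          unfold pvLines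
          exact List.mem_append_left _ (List.mem_append_right _
            (List.mem_map.mpr ⟨j, List.mem_range.mpr (by rw [hmax]; exact hj'), rfl⟩))
        have hw := hWinLe (pvColLine data j) i hcolmem (by
          rw [pvColLine_eq data c hrect j hj']; simp only [List.length_map, List.length_range]; omega)
        rwa [pvColLine_eq data c hrect j hj', winProd_map_range data.length N i _ (by omega)] at hw
      · exact hB0
    case hd =>
      split_ifs with hg
      · obtain ⟨hg1, hg2⟩ := hg
        set s0 := data.length - 1 - i + j with hs0
        have hdmem : pvDiagLine data s0 ∈ pvLines data := by
          unfold pvLines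
          exact List.mem_append_right _ (List.mem_flatMap.mpr
            ⟨s0, List.mem_range.mpr (by rw [hmax]; omega), by simp⟩)
        set lo := data.length - s0 - 1 with hlo
        have hw := hWinLe (pvDiagLine data s0) (i - lo) hdmem (by
          rw [pvDiagLine_eq data c hrect s0]; simp only [List.length_map, List.length_range]; omega)
        rw [pvDiagLine_eq data c hrect s0, winProd_map_range _ N (i - lo) _ (by omega)] at hw
        refine le_trans (le_of_eq ?_) hw
        refine pvProdK_congr N _ _ (fun k hk => ?_)
        have e1 : lo + (i - lo + k) = i + k := by omega
        rw [e1]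
        congr 1
        omega
      · exact hB0
    case hu =>
      split_ifs with hg
      · obtain ⟨hg1, hg2⟩ := hg
        set s0 := i + j + N - 1 with hs0
        have humem : pvUdagLine data s0 ∈ pvLines data := by
          unfold pvLines
          exact List.mem_append_right _ (List.mem_flatMap.mpr
            ⟨s0, List.mem_range.mpr (by rw [hmax]; omega), by simp⟩)
        set ulo := s0 + 1 - c with hulo
        have hw := hWinLe (pvUdagLine data s0) (i - ulo) humem (by
          rw [pvUdagLine_eq data c hrect s0]; simp only [List.length_map, List.length_range]; omega)
        rw [pvUdagLine_eq data c hrect s0, winProd_map_range _ N (i - ulo) _ (by omega)] at hw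
        refine le_trans (le_of_eq ?_) hw
        have hB : pvProdK N (fun k => pvG data (ulo + (i - ulo + k)) (s0 - (ulo + (i - ulo + k))))
            = pvProdK N (fun k => pvG data (i + k) (s0 - (i + k))) := by
          refine pvProdK_congr N _ _ (fun k hk => ?_)
          have e1 : ulo + (i - ulo + k) = i + k := by omega
          rw [e1]
        rw [hB]
        calc pvProdK N (fun k => pvG data (i + N - 1 - k) (j + k))
            = pvProdK N (fun k => (fun t => pvG data (i + t) (s0 - (i + t))) (N - 1 - k)) := by
              refine pvProdK_congr N _ _ (fun k hk => ?_)
              simp only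
              congr 1 <;> omega
          _ = pvProdK N (fun t => pvG data (i + t) (s0 - (i + t))) := by exact pvProdK_reflect N (fun t => pvG data (i + t) (s0 - (i + t)))
      · exact hB0
   · -- B ≤ A
    apply foldl_max_le hA0
    intro x hx
    obtain ⟨line, hline, hx⟩ := List.mem_flatMap.mp hx
    obtain ⟨sI, hsI, rfl⟩ := List.mem_map.mp hx
    rw [PySem.List.mem_pyRange_one] at hsI
    obtain ⟨s, rfl⟩ : ∃ s : Nat, sI = (s : Int) := ⟨sI.toNat, (Int.toNat_of_nonneg hsI.1).symm⟩
    have hsb : s + N ≤ line.length := by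
      have h2 := hsI.2
      omega
    rcases List.mem_append.mp hline with h12 | hdg
    · rcases List.mem_append.mp h12 with hrow | hcol
      · -- row line
        obtain ⟨i, hi, hieq⟩ := List.getElem_of_mem hrow
        have hline_eq : line = data.getD i [] := by
          rw [← hieq, List.getD_eq_getElem data [] hi]
        have hslen : s + N ≤ c := by
          rw [hline_eq, row_eq data c hrect i hi] at hsb; exact hsb
        rw [hline_eq, row_eq_map_range data c hrect i hi, winProd_map_range c N s _ hslen]
        have hs_lt : s < c := by omega
        refine le_trans ?_ (hEvalLe i s hi (by rw [row_eq data c hrect i hi]; exact hs_lt))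
        rw [evaluate_eq data c N i s hrect hN hi hs_lt]
        exact le_trans (le_of_eq (if_pos hslen).symm)
          (le_trans (le_max_right _ _) (le_max_left _ _))
      · -- column line
        obtain ⟨j, hjmem, hlineq⟩ := List.mem_map.mp hcol
        have hj' : j < c := by rw [← hmax]; exact List.mem_range.mp hjmem
        have hslen : s + N ≤ data.length := by
          rw [← hlineq, pvColLine_eq data c hrect j hj'] at hsb
          simpa using hsb
        rw [← hlineq, pvColLine_eq data c hrect j hj', winProd_map_range data.length N s _ hslen]
        have hs_lt : s < data.length := by omega
        refine le_trans ?_ (hEvalLe s j hs_lt (by rw [row_eq data c hrect s hs_lt]; exact hj'))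
        rw [evaluate_eq data c N s j hrect hN hs_lt hj']
        exact le_trans (le_of_eq (if_pos hslen).symm)
          (le_trans (le_trans (le_max_right _ _) (le_max_left _ _)) (le_max_left _ _))
    · -- diagonal / anti-diagonal line
      obtain ⟨s0, hs0mem, hin⟩ := List.mem_flatMap.mp hdg
      have hs0' : s0 < data.length + c - 1 := by
        rw [← hmax]; exact List.mem_range.mp hs0mem
      simp only [List.mem_cons, List.not_mem_nil, or_false] at hin
      rcases hin with h | h
      · -- diagonal
        subst h
        have hslen : s + N ≤ min data.length (data.length + c - s0 - 1) - (data.length - s0 - 1) := by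
          rw [pvDiagLine_eq data c hrect s0] at hsb
          simpa using hsb
        rw [pvDiagLine_eq data c hrect s0, winProd_map_range _ N s _ hslen]
        set lo := data.length - s0 - 1 with hlo
        set i := lo + s with hidef
        set j := i + s0 + 1 - data.length with hjdef
        have hg2 : i + N ≤ data.length := by omega
        have hg1 : j + N ≤ c := by omega
        have hi' : i < data.length := by omega
        have hj' : j < c := by omega
        have hwd : pvProdK N (fun k => pvG data (lo + (s + k)) (lo + (s + k) + s0 + 1 - data.length))
            = pvProdK N (fun k => pvG data (i + k) (j + k)) := by
          refine pvProdK_congr N _ _ (fun k hk => ?_)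
          have e1 : lo + (s + k) = i + k := by omega
          rw [e1]
          congr 1
          omega
        rw [hwd]
        refine le_trans ?_ (hEvalLe i j hi' (by rw [row_eq data c hrect i hi']; exact hj'))
        rw [evaluate_eq data c N i j hrect hN hi' hj']
        exact le_trans (le_of_eq (if_pos ⟨hg1, hg2⟩).symm)
          (le_trans (le_trans (le_max_left _ _) (le_max_left _ _)) (le_max_left _ _))
      · -- anti-diagonal
        subst h
        have hslen : s + N ≤ min data.length (s0 + 1) - (s0 + 1 - c) := by
          rw [pvUdagLine_eq data c hrect s0] at hsb
          simpa using hsb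
        rw [pvUdagLine_eq data c hrect s0, winProd_map_range _ N s _ hslen]
        set ulo := s0 + 1 - c with hulo
        set i := ulo + s with hidef
        set j := s0 + 1 - (i + N) with hjdef
        have hg2 : i + N ≤ data.length := by omega
        have hgs : i + N ≤ s0 + 1 := by omega
        have hg1 : j + N ≤ c := by omega
        have hi' : i < data.length := by omega
        have hj' : j < c := by omega
        have hwd : pvProdK N (fun k => pvG data (ulo + (s + k)) (s0 - (ulo + (s + k))))
            = pvProdK N (fun k => pvG data (i + k) (s0 - (i + k))) := by
          refine pvProdK_congr N _ _ (fun k hk => ?_)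
          have e1 : ulo + (s + k) = i + k := by omega
          rw [e1]
        rw [hwd]
        have hU : pvProdK N (fun k => pvG data (i + N - 1 - k) (j + k))
            = pvProdK N (fun k => pvG data (i + k) (s0 - (i + k))) := by
          calc pvProdK N (fun k => pvG data (i + N - 1 - k) (j + k))
              = pvProdK N (fun k => (fun t => pvG data (i + t) (s0 - (i + t))) (N - 1 - k)) := by
                refine pvProdK_congr N _ _ (fun k hk => ?_)
                simp only
                congr 1 <;> omega
            _ = pvProdK N (fun t => pvG data (i + t) (s0 - (i + t))) := by exact pvProdK_reflect N (fun t => pvG data (i + t) (s0 - (i + t)))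
        rw [← hU]
        refine le_trans ?_ (hEvalLe i j hi' (by rw [row_eq data c hrect i hi']; exact hj'))
        rw [evaluate_eq data c N i j hrect hN hi' hj']
        exact le_trans (le_of_eq (if_pos ⟨hg1, hg2⟩).symm) (le_max_right _ _)
  -- ============ n = 1, any grid ============
  case _ =>
   have hN1 : N = 1 := by omega
   subst hN1
   apply le_antisymm
   · apply foldl_max_le hB0
     intro x hx
     obtain ⟨i, hi, hx⟩ := List.mem_flatMap.mp hx
     obtain ⟨j, hj, rfl⟩ := List.mem_map.mp hx
     have hi' := List.mem_range.mp hi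
     have hj' := List.mem_range.mp hj
     rw [evaluate_one data i j hi' hj']
     have hrowline : data.getD i [] ∈ pvLines data := by
       unfold pvLines
       exact List.mem_append_left _ (List.mem_append_left _
         (by rw [List.getD_eq_getElem data [] hi']; exact List.getElem_mem hi'))
     have hw := hWinLe (data.getD i []) j hrowline (by omega)
     rwa [winProd_one _ j hj'] at hw
   · apply foldl_max_le hA0
     intro x hx
     obtain ⟨line, hline, hx⟩ := List.mem_flatMap.mp hx
     obtain ⟨sI, hsI, rfl⟩ := List.mem_map.mp hx
     rw [PySem.List.mem_pyRange_one] at hsI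
     obtain ⟨s, rfl⟩ : ∃ s : Nat, sI = (s : Int) := ⟨sI.toNat, (Int.toNat_of_nonneg hsI.1).symm⟩
     have hsb : s + 1 ≤ line.length := by
       have h2 := hsI.2
       omega
     rw [winProd_one line s (by omega)]
     obtain ⟨i, j, hi, hj, heq⟩ := mem_line_is_cell data line hline s (by omega)
     rw [heq, ← evaluate_one data i j hi hj]
     exact hEvalLe i j hi hj
  -- ============ n exceeds every dimension, any grid ============
  case _ =>
   obtain ⟨hbm, hbr⟩ := hbig
   apply le_antisymm
   · apply foldl_max_le hB0
     intro x hx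
     obtain ⟨i, hi, hx⟩ := List.mem_flatMap.mp hx
     obtain ⟨j, hj, rfl⟩ := List.mem_map.mp hx
     have hi' := List.mem_range.mp hi
     have hrl : (data.getD i []).length < N := by
       have hmem : data.getD i [] ∈ data := by
         rw [List.getD_eq_getElem data [] hi']; exact List.getElem_mem hi'
       have := hbr _ hmem
       omega
     rw [evaluate_zero_of_big data N i j (by omega) hrl]
     exact hB0
   · apply foldl_max_le hA0
     intro x hx
     obtain ⟨line, hline, hx⟩ := List.mem_flatMap.mp hx
     obtain ⟨sI, hsI, rfl⟩ := List.mem_map.mp hx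
     rw [PySem.List.mem_pyRange_one] at hsI
     exfalso
     have hlt : line.length < N := lines_len_lt data N (by omega)
       (fun r hr => by have := hbr r hr; omega) line hline
     omega
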